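-- pv_equiv track=rewrite | github.com/Kilari-Padmavathi-Kumari/Pandas | transport 2.py | _smart_select_columns
-- ===== SOURCE A (Python) =====
-- from typing import Dict, Any, List, Optional
--
-- def _smart_select_columns(columns: List[Dict[str, Any]]) -> List[str]:
--     """
--     Automatically detect important columns using patterns + basic schema intelligence.
--     Input:  columns = [ { "name": "...", "type": "..." }, ... ]
--     Output: list of column names.
--     """
--     KEY_PATTERNS = [
--         "id", "ts", "timestamp", "date",
--         "type", "status", "state",
--         "speed", "count", "score",
--         "site", "camera", "agent",
--         "license", "plate", "region",
--         "latitude", "longitude", "lat", "lon",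
--         "temperature", "heartbeat",
--         "alert", "failure", "sync"
--     ]
--
--     # Names & types
--     names = [c.get("name", "") for c in columns]
--     types = {c.get("name", ""): c.get("type", "").lower() for c in columns}
--
--     # 1) Pattern match columns by name
--     pattern_cols = [
--         n for n in names
--         if any(p in n.lower() for p in KEY_PATTERNS)
--     ]
--
--     # 2) Promote numeric / measure-like columns by type
--     numeric_types = ("int", "bigint", "double", "float", "decimal")
--     numeric_cols = [
--         n for n in names
--         if any(t in types.get(n, "") for t in numeric_types)
--     ]
--
--     # 3) Promote primary-key-like columns
--     pk_cols = [
--         n for n in names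
--         if n.lower().endswith("_id") or n.lower() == "id"
--     ]
--
--     # 4) Promote timestamp-like columns
--     ts_cols = [
--         n for n in names
--         if "ts" in n.lower() or "time" in n.lower() or "date" in n.lower()
--     ]
--
--     # Merge and dedupe with priority
--     merged: List[str] = []
--     for group in [pattern_cols, pk_cols, ts_cols, numeric_cols]:
--         for n in group:
--             if n and n not in merged:
--                 merged.append(n)
--
--     # Fallback: if nothing selected, just take first few columns
--     if not merged:
--         merged = names[:5]
--
--     # Cap at max 10 columns per table
--     return merged[:10]
-- ===== SOURCE B (Python) =====
-- from typing import Dict, Any, List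
--
-- def _smart_select_columns(columns: List[Dict[str, Any]]) -> List[str]:
--     KEY_PATTERNS = [
--         "id", "ts", "timestamp", "date",
--         "type", "status", "state",
--         "speed", "count", "score",
--         "site", "camera", "agent",
--         "license", "plate", "region",
--         "latitude", "longitude", "lat", "lon",
--         "temperature", "heartbeat",
--         "alert", "failure", "sync"
--     ]
--     NUMERIC_TYPES = ("int", "bigint", "double", "float", "decimal")
--
--     # One pass over columns: the name list and the name -> lowered type map.
--     names = []
--     types = {}
--     for c in columns:
--         n = c.get("name", "")
--         names.append(n)
--         types[n] = c.get("type", "").lower()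
--
--     # Non-empty names, first occurrence only, in positional order.
--     uniq = []
--     for n in names:
--         if n and n not in uniq:
--             uniq.append(n)
--
--     # Classify each kept name once into its highest-priority bucket.
--     buckets = ([], [], [], [])
--     for n in uniq:
--         low = n.lower()
--         if any(p in low for p in KEY_PATTERNS):
--             buckets[0].append(n)
--         elif low.endswith("_id") or low == "id":
--             buckets[1].append(n)
--         elif "ts" in low or "time" in low or "date" in low:
--             buckets[2].append(n)
--         elif any(t in types.get(n, "") for t in NUMERIC_TYPES):
--             buckets[3].append(n)
--
--     merged = buckets[0] + buckets[1] + buckets[2] + buckets[3]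
--     if not merged:
--         merged = names[:5]
--     return merged[:10]
-- ===== Notes on version B (the rewrite author's own statement) =====
-- stated objective: alternative
-- what changed: A builds four full pattern/pk/ts/numeric passes over the name list and then deduplicates them with a quadratic 'n not in merged' merge loop; B builds the name list and name-to-type map in one pass over the columns, keeps the first occurrence of each non-empty name once, and classifies each kept name a single time with an if/elif priority chain into four buckets that are concatenated.
import Mathlib
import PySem

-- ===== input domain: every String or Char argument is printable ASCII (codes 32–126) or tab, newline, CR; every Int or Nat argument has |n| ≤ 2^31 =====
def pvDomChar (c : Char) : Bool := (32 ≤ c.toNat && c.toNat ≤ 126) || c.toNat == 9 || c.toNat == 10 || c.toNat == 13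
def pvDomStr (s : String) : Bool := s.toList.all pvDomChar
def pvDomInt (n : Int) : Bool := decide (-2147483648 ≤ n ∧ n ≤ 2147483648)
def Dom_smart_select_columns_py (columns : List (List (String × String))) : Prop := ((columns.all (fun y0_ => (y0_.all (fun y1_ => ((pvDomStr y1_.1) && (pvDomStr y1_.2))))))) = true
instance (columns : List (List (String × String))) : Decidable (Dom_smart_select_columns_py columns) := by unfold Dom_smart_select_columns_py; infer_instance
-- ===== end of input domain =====

-- B replaces A's four whole-list comprehension passes plus a quadratically deduplicating
-- merge loop by one name/type-building pass, one dedup pass, and a single if/elif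
-- classification of each kept name into priority buckets (objective: alternative decomposition).

-- shared input-representation helper: Python's c.get(k, "") on a column dict
def pyDictGetD (c : List (String × String)) (k : String) : String :=
  PySem.Dict.getD (PySem.Dict.mk c) k ""

-- shared literal constants and per-name tests (the same subexpressions occur in both Pythons)
def keyPatterns : List String :=
  ["id", "ts", "timestamp", "date", "type", "status", "state", "speed", "count", "score",
   "site", "camera", "agent", "license", "plate", "region", "latitude", "longitude", "lat",
   "lon", "temperature", "heartbeat", "alert", "failure", "sync"]

def numericTypes : List String := ["int", "bigint", "double", "float", "decimal"]

def isPat (n : String) : Bool := keyPatterns.any (fun p => PySem.Str.isIn p (PySem.Str.lower n))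

def isPk (n : String) : Bool :=
  PySem.Str.endswith (PySem.Str.lower n) "_id" || PySem.Str.lower n == "id"

def isTs (n : String) : Bool :=
  PySem.Str.isIn "ts" (PySem.Str.lower n) || PySem.Str.isIn "time" (PySem.Str.lower n) ||
    PySem.Str.isIn "date" (PySem.Str.lower n)

def isNum (t : String) : Bool := numericTypes.any (fun x => PySem.Str.isIn x t)

-- ===== PORT A =====
def smart_select_columns_py (columns : List (List (String × String))) : List String :=
  let names := columns.map (fun c => pyDictGetD c "name")
  let types := columns.foldl
    (fun (d : PySem.Dict String String) c =>
      d.insert (pyDictGetD c "name") (PySem.Str.lower (pyDictGetD c "type"))) PySem.Dict.empty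
  let pattern_cols := names.filter isPat
  let numeric_cols := names.filter (fun n => isNum (types.getD n ""))
  let pk_cols := names.filter isPk
  let ts_cols := names.filter isTs
  let merged := [pattern_cols, pk_cols, ts_cols, numeric_cols].foldl
    (fun acc g => g.foldl (fun a n => if n ≠ "" ∧ n ∉ a then a ++ [n] else a) acc) []
  let merged := if merged = [] then PySem.List.slice names none (some 5) else merged
  PySem.List.slice merged none (some 10)

-- ===== PORT B =====
def smart_select_columns_py_alt (columns : List (List (String × String))) : List String :=
  let nt := columns.foldl
    (fun (st : List String × PySem.Dict String String) c =>
      (st.1 ++ [pyDictGetD c "name"],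
       st.2.insert (pyDictGetD c "name") (PySem.Str.lower (pyDictGetD c "type"))))
    ([], PySem.Dict.empty)
  let names := nt.1
  let types := nt.2
  let uniq := names.foldl (fun u n => if n ≠ "" ∧ n ∉ u then u ++ [n] else u) []
  let bs := uniq.foldl
    (fun (b : List String × List String × List String × List String) n =>
      if isPat n then (b.1 ++ [n], b.2.1, b.2.2.1, b.2.2.2)
      else if isPk n then (b.1, b.2.1 ++ [n], b.2.2.1, b.2.2.2)
      else if isTs n then (b.1, b.2.1, b.2.2.1 ++ [n], b.2.2.2)
      else if isNum (types.getD n "") then (b.1, b.2.1, b.2.2.1, b.2.2.2 ++ [n])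
      else b)
    ([], [], [], [])
  let merged := bs.1 ++ bs.2.1 ++ bs.2.2.1 ++ bs.2.2.2
  let merged := if merged = [] then PySem.List.slice names none (some 5) else merged
  PySem.List.slice merged none (some 10)

-- ===== PRECONDITION & SPEC =====
def Spec_smart_select_columns_py (columns : List (List (String × String))) (out : List String) : Prop := out = smart_select_columns_py_alt columns
instance (columns : List (List (String × String))) (out : List String) : Decidable (Spec_smart_select_columns_py columns out) := by unfold Spec_smart_select_columns_py; infer_instance

-- ===== CLAIM (what is proved, stated in full; the proofs are below) =====
def Claim_equal_smart_select_columns_py : Prop := ∀ (columns : List (List (String × String))), Dom_smart_select_columns_py columns → Spec_smart_select_columns_py columns (smart_select_columns_py columns)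

-- ===== LEMMAS AND PROOFS =====

-- the non-empty test, as a Bool predicate
def neS (n : String) : Bool := decide (n ≠ "")

-- first-occurrence dedup, structurally
def fd : List String → List String
  | [] => []
  | n :: ns => n :: fd (ns.filter (fun m => !decide (m = n)))
termination_by l => l.length
decreasing_by
  simp only [List.length_cons, List.length_unattach]
  exact Nat.lt_succ_of_le (le_trans (List.length_filter_le _ _) (by simp))

theorem fd_nil : fd [] = [] := by rw [fd]

theorem fd_cons (n : String) (ns : List String) :
    fd (n :: ns) = n :: fd (ns.filter (fun m => !decide (m = n))) := by
  rw [fd]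

theorem mem_fd (x : String) : ∀ (k : Nat) (l : List String), l.length ≤ k →
    (x ∈ fd l ↔ x ∈ l) := by
  intro k
  induction k with
  | zero => intro l hl; rw [List.length_eq_zero_iff.mp (Nat.le_zero.mp hl), fd_nil]
  | succ k ih =>
    intro l hl
    cases l with
    | nil => simp [fd_nil]
    | cons n ns =>
      rw [fd_cons]
      have hlen : (ns.filter (fun m => !decide (m = n))).length ≤ k :=
        le_trans (List.length_filter_le _ _) (Nat.le_of_succ_le_succ hl)
      by_cases hx : x = n
      · simp [hx]
      · rw [List.mem_cons, List.mem_cons, ih _ hlen, List.mem_filter]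
        simp [hx]

theorem fd_filter (p : String → Bool) : ∀ (k : Nat) (l : List String), l.length ≤ k →
    fd (l.filter p) = (fd l).filter p := by
  intro k
  induction k with
  | zero => intro l hl; rw [List.length_eq_zero_iff.mp (Nat.le_zero.mp hl)]; simp [fd_nil]
  | succ k ih =>
    intro l hl
    cases l with
    | nil => simp [fd_nil]
    | cons n ns =>
      have hk : ns.length ≤ k := Nat.le_of_succ_le_succ hl
      have hcomm : (ns.filter p).filter (fun m => !decide (m = n))
          = (ns.filter (fun m => !decide (m = n))).filter p := by
        rw [List.filter_filter, List.filter_filter]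
        exact List.filter_congr (fun x _ => Bool.and_comm _ _)
      by_cases hp : p n = true
      · have e1 : (n :: ns).filter p = n :: ns.filter p := by simp [hp]
        rw [e1, fd_cons, fd_cons, hcomm,
          ih _ (le_trans (List.length_filter_le _ _) hk)]
        simp [hp]
      · have e1 : (n :: ns).filter p = ns.filter p := by simp [hp]
        have e2 : ns.filter p = (ns.filter (fun m => !decide (m = n))).filter p := by
          rw [List.filter_filter]
          apply List.filter_congr
          intro x _
          by_cases hq : p x = true
          · have hxn : ¬ x = n := fun he => hp (he ▸ hq)
            simp [hq, hxn]
          · simp [hq]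
        rw [e1, e2, ih _ (le_trans (List.length_filter_le _ _) hk), fd_cons]
        simp [hp]

-- A's dedup-merge loop appends the first-occurrence dedup of the new, nonempty, unseen names
theorem insAll_eq : ∀ (g acc : List String),
    g.foldl (fun a n => if n ≠ "" ∧ n ∉ a then a ++ [n] else a) acc
      = acc ++ fd (g.filter (fun n => decide (n ≠ "" ∧ n ∉ acc))) := by
  intro g
  induction g with
  | nil => intro acc; simp [fd_nil]
  | cons n gs ih =>
    intro acc
    simp only [List.foldl_cons]
    by_cases hc : n ≠ "" ∧ n ∉ acc
    · rw [if_pos hc, ih (acc ++ [n])]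
      have e1 : (n :: gs).filter (fun m => decide (m ≠ "" ∧ m ∉ acc))
          = n :: gs.filter (fun m => decide (m ≠ "" ∧ m ∉ acc)) := by
        simp [hc.1, hc.2]
      rw [e1, fd_cons, List.filter_filter]
      have e2 : gs.filter (fun m => decide (m ≠ "" ∧ m ∉ acc ++ [n]))
          = gs.filter (fun a => !decide (a = n) && decide (a ≠ "" ∧ a ∉ acc)) := by
        apply List.filter_congr
        intro x _
        by_cases hx : x = n <;> by_cases he : x = "" <;>
          by_cases hm : x ∈ acc <;> simp [hx, he, hm]
      rw [e2]
      simp [List.append_assoc]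
    · rw [if_neg hc]
      have e1 : (n :: gs).filter (fun m => decide (m ≠ "" ∧ m ∉ acc))
          = gs.filter (fun m => decide (m ≠ "" ∧ m ∉ acc)) := by
        simp only [List.filter_cons, decide_eq_true_eq]
        rw [if_neg hc]
      rw [e1, ih acc]

-- one merge pass of A, over a pattern-filtered group, with the seen-so-far set characterised
theorem stepL (names acc : List String) (G sofar : String → Bool)
    (h : ∀ x ∈ names, x ∈ acc ↔ (neS x && sofar x) = true) :
    (names.filter G).foldl (fun a n => if n ≠ "" ∧ n ∉ a then a ++ [n] else a) acc
      = acc ++ (fd (names.filter neS)).filter (fun n => !sofar n && G n) := by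
  rw [insAll_eq, List.filter_filter]
  have h1 : names.filter (fun a => decide (a ≠ "" ∧ a ∉ acc) && G a)
      = names.filter (fun a => (!sofar a && G a) && neS a) := by
    apply List.filter_congr
    intro x hx
    have hm := h x hx
    cases hG : G x <;> cases hs : sofar x <;> by_cases he : x = "" <;>
      simp_all [neS]
  rw [h1, ← List.filter_filter, fd_filter _ (names.filter neS).length _ le_rfl]

theorem stepMem (names acc : List String) (G sofar : String → Bool)
    (h : ∀ x ∈ names, x ∈ acc ↔ (neS x && sofar x) = true) :
    ∀ x ∈ names, x ∈ acc ++ (fd (names.filter neS)).filter (fun n => !sofar n && G n)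
      ↔ (neS x && (sofar x || G x)) = true := by
  intro x hx
  have hm := h x hx
  have hU : x ∈ fd (names.filter neS) ↔ (x ∈ names ∧ neS x = true) := by
    rw [mem_fd x (names.filter neS).length _ le_rfl, List.mem_filter]
  rw [List.mem_append, List.mem_filter, hU, hm]
  cases hG : G x <;> cases hs : sofar x <;> by_cases he : x = "" <;>
    simp_all [neS]

-- A's whole four-pass merge, as the four priority filters of the deduped non-empty names
theorem mergeA (N : List String) (pT : String → Bool) :
    [N.filter isPat, N.filter isPk, N.filter isTs, N.filter pT].foldl
        (fun acc g => g.foldl (fun a n => if n ≠ "" ∧ n ∉ a then a ++ [n] else a) acc) []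
      = (fd (N.filter neS)).filter isPat
        ++ (fd (N.filter neS)).filter (fun n => !isPat n && isPk n)
        ++ (fd (N.filter neS)).filter (fun n => !(isPat n || isPk n) && isTs n)
        ++ (fd (N.filter neS)).filter (fun n => !(isPat n || isPk n || isTs n) && pT n) := by
  have h0 : ∀ x ∈ N, x ∈ ([] : List String) ↔ (neS x && (fun _ => false) x) = true := by
    simp
  have m1 := stepMem N [] isPat (fun _ => false) h0
  have m2 := stepMem N _ isPk (fun x => (fun _ => false) x || isPat x) m1
  have m3 := stepMem N _ isTs (fun x => ((fun _ => false) x || isPat x) || isPk x) m2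
  simp only [List.foldl_cons, List.foldl_nil]
  rw [stepL N [] isPat (fun _ => false) h0,
    stepL N _ isPk (fun x => (fun _ => false) x || isPat x) m1,
    stepL N _ isTs (fun x => ((fun _ => false) x || isPat x) || isPk x) m2,
    stepL N _ pT (fun x => (((fun _ => false) x || isPat x) || isPk x) || isTs x) m3]
  simp only [Bool.false_or, Bool.not_false, Bool.true_and, List.nil_append,
    List.append_assoc, Bool.or_assoc]

-- B's name/type building pass equals A's two separate passes
-- B's name/type building pass equals A's two separate passes
theorem pairfold (f g : List (String × String) → String) :
    ∀ (cols : List (List (String × String))) (ns : List String)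
      (d : PySem.Dict String String),
    cols.foldl (fun (st : List String × PySem.Dict String String) c =>
        (st.1 ++ [f c], st.2.insert (f c) (PySem.Str.lower (g c)))) (ns, d)
      = (ns ++ cols.map f,
         cols.foldl (fun (d' : PySem.Dict String String) c =>
            d'.insert (f c) (PySem.Str.lower (g c))) d) := by
  intro cols
  induction cols with
  | nil => intro ns d; simp
  | cons c cs ih => intro ns d; simp [ih, List.append_assoc]

-- B's classification pass fills the four buckets with the four priority filters
theorem bucketfold (types : PySem.Dict String String) :
    ∀ (l b0 b1 b2 b3 : List String),
    l.foldl (fun (b : List String × List String × List String × List String) n =>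
        if isPat n then (b.1 ++ [n], b.2.1, b.2.2.1, b.2.2.2)
        else if isPk n then (b.1, b.2.1 ++ [n], b.2.2.1, b.2.2.2)
        else if isTs n then (b.1, b.2.1, b.2.2.1 ++ [n], b.2.2.2)
        else if isNum (types.getD n "") then (b.1, b.2.1, b.2.2.1, b.2.2.2 ++ [n])
        else b) (b0, b1, b2, b3)
      = (b0 ++ l.filter isPat,
         b1 ++ l.filter (fun n => !isPat n && isPk n),
         b2 ++ l.filter (fun n => !(isPat n || isPk n) && isTs n),
         b3 ++ l.filter (fun n => !(isPat n || isPk n || isTs n) && isNum (types.getD n ""))) := by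
  intro l
  induction l with
  | nil => intro b0 b1 b2 b3; simp
  | cons n ns ih =>
    intro b0 b1 b2 b3
    by_cases h0 : isPat n = true
    · simp [List.foldl_cons, h0, ih, List.append_assoc]
    · by_cases h1 : isPk n = true
      · simp [List.foldl_cons, h0, h1, ih, List.append_assoc]
      · by_cases h2 : isTs n = true
        · simp [List.foldl_cons, h0, h1, h2, ih, List.append_assoc]
        · by_cases h3 : isNum (types.getD n "") = true
          · simp [List.foldl_cons, h0, h1, h2, h3, ih, List.append_assoc]
          · simp [List.foldl_cons, h0, h1, h2, h3, ih]

-- ===== VERDICT (by name: the statement is the Claim_ definition above) =====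
theorem smart_select_columns_py_spec : Claim_equal_smart_select_columns_py := by
  intro columns _
  unfold Spec_smart_select_columns_py
  rw [smart_select_columns_py, smart_select_columns_py_alt]
  rw [pairfold (fun c => pyDictGetD c "name") (fun c => pyDictGetD c "type") columns [] PySem.Dict.empty]
  simp only [List.nil_append]
  rw [mergeA, insAll_eq]
  have epred : (columns.map fun c => pyDictGetD c "name").filter
        (fun n => decide (n ≠ "" ∧ n ∉ ([] : List String)))
      = (columns.map fun c => pyDictGetD c "name").filter neS := by
    apply List.filter_congr
    intro x _
    simp [neS]
  rw [epred]
  simp only [List.nil_append]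
  rw [bucketfold]
  simp only [List.nil_append, List.append_assoc]
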